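-- pv_equiv track=rewrite | github.com/daniel10027/cursus | tasks/largestDistance.py | largestDistance
-- ===== SOURCE A (Python) =====
-- def largestDistance(A):
--
--     mx = [A[0], A[1]]
--     mn = [A[0], A[1]]
--     for i in range(len(A)):
--         k =  i%2
--         if A[i] > mx[k]:
--             mx[k] = A[i]
--         elif A[i] < mn[k]:
--             mn[k] = A[i]
--     return max(mx[0] - mn[0], mx[1] - mn[1])
-- ===== SOURCE B (Python) =====
-- def largestDistance(A):
--     evens = sorted(x for i, x in enumerate(A) if i % 2 == 0)
--     odds = sorted(x for i, x in enumerate(A) if i % 2 == 1)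
--     return max(evens[-1] - evens[0], odds[-1] - odds[0])
-- ===== Notes on version B (the rewrite author's own statement) =====
-- stated objective: alternative
-- what changed: Replaces A's single interleaved running min/max scan by sorting each parity class and reading the range off the sorted list's endpoints (last minus first).
import Mathlib
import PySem

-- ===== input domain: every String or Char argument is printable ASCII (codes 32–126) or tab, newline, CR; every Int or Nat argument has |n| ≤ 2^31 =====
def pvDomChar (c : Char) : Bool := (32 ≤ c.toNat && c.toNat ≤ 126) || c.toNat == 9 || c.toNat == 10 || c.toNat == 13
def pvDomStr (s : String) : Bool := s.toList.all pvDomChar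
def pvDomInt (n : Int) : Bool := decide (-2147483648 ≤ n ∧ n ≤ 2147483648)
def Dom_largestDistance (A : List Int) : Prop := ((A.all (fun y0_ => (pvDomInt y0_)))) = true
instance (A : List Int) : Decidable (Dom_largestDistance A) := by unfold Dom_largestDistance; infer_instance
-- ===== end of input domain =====

-- B replaces A's interleaved running min/max scan by sorting each parity class and
-- reading the range off the sorted list's endpoints (objective: alternative algorithm).

-- ===== PORT A =====
def largestDistance (A : List Int) : Int :=
  -- mx = [A[0], A[1]]; mn = [A[0], A[1]]   (state carried as (mx0, mx1, mn0, mn1))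
  let a0 := PySem.List.pyGetD A 0 0
  let a1 := PySem.List.pyGetD A 1 0
  let st := (PySem.List.pyRange 0 (PySem.List.len A) 1).foldl
    (fun (st : Int × Int × Int × Int) i =>
      if PySem.Int.mod i 2 = 0 then
        if PySem.List.pyGetD A i 0 > st.1 then (PySem.List.pyGetD A i 0, st.2.1, st.2.2.1, st.2.2.2)
        else if PySem.List.pyGetD A i 0 < st.2.2.1 then (st.1, st.2.1, PySem.List.pyGetD A i 0, st.2.2.2)
        else st
      else
        if PySem.List.pyGetD A i 0 > st.2.1 then (st.1, PySem.List.pyGetD A i 0, st.2.2.1, st.2.2.2)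
        else if PySem.List.pyGetD A i 0 < st.2.2.2 then (st.1, st.2.1, st.2.2.1, PySem.List.pyGetD A i 0)
        else st)
    (a0, a1, a0, a1)
  max (st.1 - st.2.2.1) (st.2.1 - st.2.2.2)

-- ===== PORT B =====
def largestDistance_alt (A : List Int) : Int :=
  let evens := PySem.List.sorted (((PySem.List.enumerate A).filter (fun p => PySem.Int.mod p.1 2 == 0)).map Prod.snd) (fun x => x) false
  let odds := PySem.List.sorted (((PySem.List.enumerate A).filter (fun p => PySem.Int.mod p.1 2 == 1)).map Prod.snd) (fun x => x) false
  max (PySem.List.pyGetD evens (-1) 0 - PySem.List.pyGetD evens 0 0)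
      (PySem.List.pyGetD odds (-1) 0 - PySem.List.pyGetD odds 0 0)

-- ===== PRECONDITION & SPEC =====
-- Python A evaluates A[1] before the loop (and B indexes evens[-1]/odds[-1]), so both raise IndexError on lists of length < 2.
def Pre_largestDistance (A : List Int) : Prop := 2 ≤ A.length
instance (A : List Int) : Decidable (Pre_largestDistance A) := by unfold Pre_largestDistance; infer_instance
def pvWitness_largestDistance : List Int := [3, -1, 7]

def Spec_largestDistance (A : List Int) (out : Int) : Prop := out = largestDistance_alt A
instance (A : List Int) (out : Int) : Decidable (Spec_largestDistance A out) := by unfold Spec_largestDistance; infer_instance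

-- ===== CLAIM (what is proved, stated in full; the proofs are below) =====
def Claim_equal_largestDistance : Prop := ∀ (A : List Int), Dom_largestDistance A → Pre_largestDistance A → Spec_largestDistance A (largestDistance A)

-- ===== LEMMAS AND PROOFS =====

-- (evens, odds): the elements at even resp. odd positions
def eo : List Int → List Int × List Int
  | [] => ([], [])
  | a :: t => (a :: (eo t).2, (eo t).1)

-- A's loop body, on an (index, value) pair
def stepG (st : Int × Int × Int × Int) (p : Int × Int) : Int × Int × Int × Int :=
  if PySem.Int.mod p.1 2 = 0 then
    if p.2 > st.1 then (p.2, st.2.1, st.2.2.1, st.2.2.2)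
    else if p.2 < st.2.2.1 then (st.1, st.2.1, p.2, st.2.2.2)
    else st
  else
    if p.2 > st.2.1 then (st.1, p.2, st.2.2.1, st.2.2.2)
    else if p.2 < st.2.2.2 then (st.1, st.2.1, st.2.2.1, p.2)
    else st

lemma mod_two_mul (k : Int) : PySem.Int.mod (2 * k) 2 = 0 := by
  unfold PySem.Int.mod; rw [Int.fmod_eq_emod]; simp

lemma mod_two_mul_add_one (k : Int) : PySem.Int.mod (2 * k + 1) 2 = 1 := by
  unfold PySem.Int.mod; rw [Int.fmod_eq_emod]; simp

lemma eo_filter (l : List Int) : ∀ (k : Int),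
    ((((PySem.List.enumerate l (2 * k)).filter (fun p => PySem.Int.mod p.1 2 == 0)).map Prod.snd = (eo l).1)
     ∧ (((PySem.List.enumerate l (2 * k)).filter (fun p => PySem.Int.mod p.1 2 == 1)).map Prod.snd = (eo l).2))
    ∧ ((((PySem.List.enumerate l (2 * k + 1)).filter (fun p => PySem.Int.mod p.1 2 == 0)).map Prod.snd = (eo l).2)
     ∧ (((PySem.List.enumerate l (2 * k + 1)).filter (fun p => PySem.Int.mod p.1 2 == 1)).map Prod.snd = (eo l).1)) := by
  induction l with
  | nil => intro k; simp [PySem.List.enumerate, eo]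
  | cons a t ih =>
    intro k
    have h0 := mod_two_mul k
    have h1 := mod_two_mul_add_one k
    have h2 : (2 : Int) * k + 1 + 1 = 2 * (k + 1) := by ring
    have e00 : (((0:Int)) == (0:Int)) = true := by decide
    have e11 : (((1:Int)) == (1:Int)) = true := by decide
    have e10 : (((1:Int)) == (0:Int)) = false := by decide
    have e01 : (((0:Int)) == (1:Int)) = false := by decide
    refine ⟨⟨?_, ?_⟩, ?_, ?_⟩
    · rw [PySem.List.enumerate_cons]
      simp only [List.filter_cons, h0, e00, if_true, List.map_cons]
      rw [(ih k).2.1]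
      simp [eo]
    · rw [PySem.List.enumerate_cons]
      simp only [List.filter_cons, h0, e01, Bool.false_eq_true, if_false]
      exact (ih k).2.2
    · rw [PySem.List.enumerate_cons, h2]
      simp only [List.filter_cons, h1, e10, Bool.false_eq_true, if_false]
      rw [(ih (k + 1)).1.1]
      simp [eo]
    · rw [PySem.List.enumerate_cons, h2]
      simp only [List.filter_cons, h1, e11, if_true, List.map_cons]
      rw [(ih (k + 1)).1.2]
      simp [eo]

lemma foldG (l : List Int) : ∀ (k x0 x1 y0 y1 : Int), y0 ≤ x0 → y1 ≤ x1 →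
    ((PySem.List.enumerate l (2 * k)).foldl stepG (x0, x1, y0, y1)
      = ((eo l).1.foldl max x0, (eo l).2.foldl max x1, (eo l).1.foldl min y0, (eo l).2.foldl min y1))
    ∧ ((PySem.List.enumerate l (2 * k + 1)).foldl stepG (x0, x1, y0, y1)
      = ((eo l).2.foldl max x0, (eo l).1.foldl max x1, (eo l).2.foldl min y0, (eo l).1.foldl min y1)) := by
  induction l with
  | nil => intro k x0 x1 y0 y1 _ _; simp [PySem.List.enumerate, eo]
  | cons a t ih =>
    intro k x0 x1 y0 y1 hy0 hy1
    have h0 := mod_two_mul k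
    have h1 := mod_two_mul_add_one k
    have h2 : (2 : Int) * k + 1 + 1 = 2 * (k + 1) := by ring
    constructor
    · rw [PySem.List.enumerate_cons]
      simp only [List.foldl_cons]
      have hstep : stepG (x0, x1, y0, y1) (2 * k, a) = (max x0 a, x1, min y0 a, y1) := by
        simp only [stepG, h0, if_pos]
        by_cases h : a > x0
        · have : ¬ a < y0 := by omega
          simp only [if_pos h]
          have hm : max x0 a = a := by omega
          have hn : min y0 a = y0 := by omega
          simp [hm, hn]
        · by_cases h' : a < y0
          · simp only [if_neg h, if_pos h']
            have hm : max x0 a = x0 := by omega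
            have hn : min y0 a = a := by omega
            simp [hm, hn]
          · simp only [if_neg h, if_neg h']
            have hm : max x0 a = x0 := by omega
            have hn : min y0 a = y0 := by omega
            simp [hm, hn]
      rw [hstep]
      have := (ih k (max x0 a) x1 (min y0 a) y1 (by omega) hy1).2
      simp only [eo, List.foldl_cons]
      exact this
    · rw [PySem.List.enumerate_cons, h2]
      simp only [List.foldl_cons]
      have hstep : stepG (x0, x1, y0, y1) (2 * k + 1, a) = (x0, max x1 a, y0, min y1 a) := by
        simp only [stepG, h1]
        norm_num
        by_cases h : a > x1
        · have : ¬ a < y1 := by omega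
          simp only [if_pos h]
          have hm : max x1 a = a := by omega
          have hn : min y1 a = y1 := by omega
          simp [hm, hn]
        · by_cases h' : a < y1
          · simp only [if_neg h, if_pos h']
            have hm : max x1 a = x1 := by omega
            have hn : min y1 a = a := by omega
            simp [hm, hn]
          · simp only [if_neg h, if_neg h']
            have hm : max x1 a = x1 := by omega
            have hn : min y1 a = y1 := by omega
            simp [hm, hn]
      rw [hstep]
      have := (ih (k + 1) x0 (max x1 a) y0 (min y1 a) hy0 (by omega)).1
      simp only [eo, List.foldl_cons]
      exact this

-- bridge: A's index fold over range(len(A)) is the stepG fold over enumerate(A)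
lemma bridgeA (A : List Int) (st0 : Int × Int × Int × Int) :
    (PySem.List.pyRange 0 (PySem.List.len A) 1).foldl
      (fun (st : Int × Int × Int × Int) i =>
        if PySem.Int.mod i 2 = 0 then
          if PySem.List.pyGetD A i 0 > st.1 then (PySem.List.pyGetD A i 0, st.2.1, st.2.2.1, st.2.2.2)
          else if PySem.List.pyGetD A i 0 < st.2.2.1 then (st.1, st.2.1, PySem.List.pyGetD A i 0, st.2.2.2)
          else st
        else
          if PySem.List.pyGetD A i 0 > st.2.1 then (st.1, PySem.List.pyGetD A i 0, st.2.2.1, st.2.2.2)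
          else if PySem.List.pyGetD A i 0 < st.2.2.2 then (st.1, st.2.1, st.2.2.1, PySem.List.pyGetD A i 0)
          else st) st0
    = (PySem.List.enumerate A).foldl stepG st0 := by
  rw [PySem.List.enumerate_eq_map_pyRange A 0, List.foldl_map]
  rfl

-- foldl max/min: membership and bound facts
lemma foldl_max_mem (l : List Int) : ∀ a, l.foldl max a ∈ a :: l := by
  induction l with
  | nil => intro a; simp
  | cons b t ih =>
    intro a
    simp only [List.foldl_cons]
    rcases List.mem_cons.mp (ih (max a b)) with h | h
    · rw [h]; rcases max_choice a b with hm | hm <;> simp [hm]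
    · simp [h]

lemma foldl_min_mem (l : List Int) : ∀ a, l.foldl min a ∈ a :: l := by
  induction l with
  | nil => intro a; simp
  | cons b t ih =>
    intro a
    simp only [List.foldl_cons]
    rcases List.mem_cons.mp (ih (min a b)) with h | h
    · rw [h]; rcases min_choice a b with hm | hm <;> simp [hm]
    · simp [h]

lemma le_foldl_max' (l : List Int) : ∀ a x, x ∈ a :: l → x ≤ l.foldl max a := by
  induction l with
  | nil => intro a x hx; simp at hx ⊢; omega
  | cons b t ih =>
    intro a x hx
    simp only [List.foldl_cons]
    rcases List.mem_cons.mp hx with h | h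
    · rw [h]; exact le_trans (le_max_left a b) (ih (max a b) _ (List.mem_cons_self))
    rcases List.mem_cons.mp h with h' | h'
    · rw [h']; exact le_trans (le_max_right a b) (ih (max a b) _ (List.mem_cons_self))
    · exact ih (max a b) x (List.mem_cons_of_mem _ h')

lemma foldl_min_le' (l : List Int) : ∀ a x, x ∈ a :: l → l.foldl min a ≤ x := by
  induction l with
  | nil => intro a x hx; simp at hx ⊢; omega
  | cons b t ih =>
    intro a x hx
    simp only [List.foldl_cons]
    rcases List.mem_cons.mp hx with h | h
    · rw [h]; exact le_trans (ih (min a b) _ (List.mem_cons_self)) (min_le_left a b)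
    rcases List.mem_cons.mp h with h' | h'
    · rw [h']; exact le_trans (ih (min a b) _ (List.mem_cons_self)) (min_le_right a b)
    · exact ih (min a b) x (List.mem_cons_of_mem _ h')

-- in a ≤-sorted chain the last element dominates all elements
lemma pairwise_le_getLast : ∀ (s : List Int) (hne : s ≠ []), s.Pairwise (· ≤ ·) →
    ∀ x ∈ s, x ≤ s.getLast hne := by
  intro s
  induction s with
  | nil => intro hne; exact absurd rfl hne
  | cons h t ih =>
    intro _ hp x hx
    rcases List.pairwise_cons.mp hp with ⟨hall, hp'⟩
    cases t with
    | nil => simp at hx; simp [List.getLast, hx]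
    | cons b u =>
      rw [List.getLast_cons (by simp)]
      rcases List.mem_cons.mp hx with h1 | h1
      · subst h1; exact hall _ (List.getLast_mem (by simp))
      · exact ih (by simp) hp' x h1

-- the range of a nonempty list read off its sorted endpoints equals the fold extrema
lemma sorted_endpoints (a : Int) (l : List Int) :
    PySem.List.pyGetD (PySem.List.sorted (a :: l) (fun x => x) false) (-1) 0
      - PySem.List.pyGetD (PySem.List.sorted (a :: l) (fun x => x) false) 0 0
    = l.foldl max a - l.foldl min a := by
  have hperm := PySem.List.sorted_perm (a :: l) (fun x : Int => x) false
  have hpw := PySem.List.sorted_pairwise (a :: l) (fun x : Int => x)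
  have hne : PySem.List.sorted (a :: l) (fun x : Int => x) false ≠ [] := by
    intro h
    rw [PySem.List.sorted_eq_nil_iff] at h
    exact List.cons_ne_nil a l h
  obtain ⟨h, t, hs⟩ := List.exists_cons_of_ne_nil hne
  have hmem : ∀ x, x ∈ PySem.List.sorted (a :: l) (fun x : Int => x) false ↔ x ∈ a :: l := by
    intro x; exact hperm.mem_iff
  -- head is the minimum
  have hhead_le : ∀ y ∈ a :: l, h ≤ y := by
    intro y hy
    exact PySem.List.key_head_sorted_le (a :: l) (fun x : Int => x) hs y hy
  have hhead_mem : h ∈ a :: l := (hmem h).mp (hs ▸ List.mem_cons_self)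
  have hhead : h = l.foldl min a := by
    have h1 : l.foldl min a ≤ h := foldl_min_le' l a h hhead_mem
    have h2 : h ≤ l.foldl min a := hhead_le _ (foldl_min_mem l a)
    omega
  -- last is the maximum
  have hlast_ge : ∀ x ∈ a :: l, x ≤ (PySem.List.sorted (a :: l) (fun x : Int => x) false).getLast hne := by
    intro x hx
    exact pairwise_le_getLast _ hne hpw x ((hmem x).mpr hx)
  have hlast_mem : (PySem.List.sorted (a :: l) (fun x : Int => x) false).getLast hne ∈ a :: l :=
    (hmem _).mp (List.getLast_mem hne)
  have hlast : (PySem.List.sorted (a :: l) (fun x : Int => x) false).getLast hne = l.foldl max a := by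
    have h1 : (PySem.List.sorted (a :: l) (fun x : Int => x) false).getLast hne ≤ l.foldl max a :=
      le_foldl_max' l a _ hlast_mem
    have h2 : l.foldl max a ≤ (PySem.List.sorted (a :: l) (fun x : Int => x) false).getLast hne :=
      hlast_ge _ (foldl_max_mem l a)
    omega
  -- translate pyGetD at -1 and 0
  have hget_last : PySem.List.pyGetD (PySem.List.sorted (a :: l) (fun x : Int => x) false) (-1) 0
      = (PySem.List.sorted (a :: l) (fun x : Int => x) false).getLast hne := by
    unfold PySem.List.pyGetD
    rw [PySem.List.pyGet?_neg_one, List.getLast?_eq_getLast_of_ne_nil hne]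
    rfl
  have hget_head : PySem.List.pyGetD (PySem.List.sorted (a :: l) (fun x : Int => x) false) 0 0 = h := by
    rw [hs]
    unfold PySem.List.pyGetD
    rw [PySem.List.pyGet?_zero_cons]
    rfl
  rw [hget_last, hget_head, hlast, hhead]

-- ===== VERDICT (by name: the statement is the Claim_ definition above) =====
theorem largestDistance_spec : Claim_equal_largestDistance := by
  intro A _ hpre
  unfold Pre_largestDistance at hpre
  match A, hpre with
  | a0 :: a1 :: t, _ =>
    show largestDistance (a0 :: a1 :: t) = largestDistance_alt (a0 :: a1 :: t)
    unfold largestDistance largestDistance_alt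
    simp only []
    rw [bridgeA]
    have hA0 : PySem.List.pyGetD (a0 :: a1 :: t) 0 0 = a0 := by
      simp [PySem.List.pyGetD, PySem.List.pyGet?, PySem.List.pyIdx?]
      rw [if_pos (by omega)]
      simp
    have hA1 : PySem.List.pyGetD (a0 :: a1 :: t) 1 0 = a1 := by
      simp [PySem.List.pyGetD, PySem.List.pyGet?, PySem.List.pyIdx?]
    rw [hA0, hA1]
    -- B side: identify the two filtered lists
    have hev : ((PySem.List.enumerate (a0 :: a1 :: t)).filter
        (fun p => PySem.Int.mod p.1 2 == 0)).map Prod.snd = (eo (a0 :: a1 :: t)).1 := by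
      have := ((eo_filter (a0 :: a1 :: t) 0).1).1
      simp only [show (2:Int) * 0 = 0 from by norm_num] at this
      exact this
    have hod : ((PySem.List.enumerate (a0 :: a1 :: t)).filter
        (fun p => PySem.Int.mod p.1 2 == 1)).map Prod.snd = (eo (a0 :: a1 :: t)).2 := by
      have := ((eo_filter (a0 :: a1 :: t) 0).1).2
      simp only [show (2:Int) * 0 = 0 from by norm_num] at this
      exact this
    rw [hev, hod]
    have heo1 : (eo (a0 :: a1 :: t)).1 = a0 :: (eo t).1 := by simp [eo]
    have heo2 : (eo (a0 :: a1 :: t)).2 = a1 :: (eo t).2 := by simp [eo]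
    rw [heo1, heo2]
    -- A side: evaluate the fold
    have henum : PySem.List.enumerate (a0 :: a1 :: t) 0
        = (0, a0) :: (1, a1) :: PySem.List.enumerate t 2 := by
      rw [PySem.List.enumerate_cons, PySem.List.enumerate_cons]
      norm_num
    rw [henum]
    simp only [List.foldl_cons]
    have hs0 : stepG (a0, a1, a0, a1) (0, a0) = (a0, a1, a0, a1) := by
      simp [stepG, PySem.Int.mod]
    have hs1 : stepG (a0, a1, a0, a1) (1, a1) = (a0, a1, a0, a1) := by
      simp [stepG, PySem.Int.mod]
    rw [hs0, hs1]
    have hfold := (foldG t 1 a0 a1 a0 a1 le_rfl le_rfl).1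
    simp only [show (2:Int) * 1 = 2 from by norm_num] at hfold
    rw [hfold]
    rw [sorted_endpoints a0 (eo t).1, sorted_endpoints a1 (eo t).2]
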